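-- pv_equiv track=rewrite | github.com/Shourya-19/genomes_got_latent | uniref_blast_to_csv.py | parse_sseqid
-- ===== SOURCE A (Python) =====
-- def parse_sseqid(sseqid):
--     """
--     Parse a UniRef sseqid string into its components.
--
--     Example input:
--         UniRef50_Q63036 Rat albumin (Fragment) n=1 Tax=Rattus norvegicus TaxID=10116 RepID=Q63036_RAT
--
--     Returns a dict with keys: acc_id, function, genus, species.
--     Fields that cannot be parsed are returned as empty strings.
--     """
--     result = {"acc_id": "", "function": "", "genus": "", "species": ""}
--
--     # acc_id – everything after the last underscore in the first token
--     # e.g. UniRef50_Q63036 → Q63036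
--     first_token = sseqid.split()[0]             # 'UniRef50_Q63036'
--     result["acc_id"] = first_token.rsplit('_', 1)[-1]
--
--     rest = sseqid[len(first_token):].strip()    # 'Rat albumin (Fragment) n=1 Tax=...'
--
--     # function – text before the first metadata tag
--     func_end = len(rest)
--     for marker in (' n=', ' Tax=', ' TaxID=', ' RepID='):
--         idx = rest.find(marker)
--         if idx != -1 and idx < func_end:
--             func_end = idx
--     result["function"] = rest[:func_end].strip()
--
--     # genus + species – from 'Tax=Rattus norvegicus'
--     tax_idx = rest.find('Tax=')
--     if tax_idx != -1:
--         tax_str = rest[tax_idx + len('Tax='):]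
--         # stop at the next tag (TaxID=, RepID=, etc.)
--         for stop in (' TaxID=', ' RepID=', ' n='):
--             stop_idx = tax_str.find(stop)
--             if stop_idx != -1:
--                 tax_str = tax_str[:stop_idx]
--         tax_parts = tax_str.strip().split()
--         if len(tax_parts) >= 1:
--             result["genus"] = tax_parts[0]
--         if len(tax_parts) >= 2:
--             result["species"] = tax_parts[1]
--
--     return result
-- ===== SOURCE B (Python) =====
-- def _first_hit(s, markers):
--     # single left-to-right scan: first index where any marker starts, else len(s)
--     for i in range(len(s)):
--         if any(s.startswith(m, i) for m in markers):
--             return i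
--     return len(s)
--
--
-- def parse_sseqid(sseqid):
--     first_token = sseqid.split()[0]
--     acc_id = first_token.rsplit('_', 1)[-1]
--     rest = sseqid[len(first_token):].strip()
--
--     function = rest[:_first_hit(rest, (' n=', ' Tax=', ' TaxID=', ' RepID='))].strip()
--
--     genus = species = ""
--     tax_idx = rest.find('Tax=')
--     if tax_idx != -1:
--         tax_str = rest[tax_idx + 4:]
--         tax_str = tax_str[:_first_hit(tax_str, (' TaxID=', ' RepID=', ' n='))]
--         tax_parts = tax_str.strip().split()
--         genus = tax_parts[0] if tax_parts else ""
--         species = tax_parts[1] if len(tax_parts) > 1 else ""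
--
--     return {"acc_id": acc_id, "function": function, "genus": genus, "species": species}
-- ===== Notes on version B (the rewrite author's own statement) =====
-- stated objective: alternative
-- what changed: Replaces A's per-marker find-and-keep-min pass for the function field and its sequential three-stop truncation of the Tax substring by a single left-to-right scan (_first_hit) that tests all markers simultaneously at each position and cuts once at the first hit.
import Mathlib
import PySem

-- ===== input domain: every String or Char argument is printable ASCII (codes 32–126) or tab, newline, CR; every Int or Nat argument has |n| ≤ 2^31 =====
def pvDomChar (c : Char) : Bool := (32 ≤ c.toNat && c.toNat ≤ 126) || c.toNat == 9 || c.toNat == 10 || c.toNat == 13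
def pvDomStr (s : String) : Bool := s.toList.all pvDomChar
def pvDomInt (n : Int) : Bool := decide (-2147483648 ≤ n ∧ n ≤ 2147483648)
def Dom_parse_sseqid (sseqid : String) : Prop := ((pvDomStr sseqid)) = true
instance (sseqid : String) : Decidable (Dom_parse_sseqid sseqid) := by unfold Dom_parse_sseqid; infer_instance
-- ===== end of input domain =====

-- B replaces A's per-marker find-and-keep-min passes (and the sequential stop-marker
-- truncation of the Tax substring) by ONE left-to-right scan that tests all markers
-- simultaneously and cuts at the first hit; objective: alternative (same cost).

-- ===== PORT A =====

-- Python t.rsplit('_', 1)[-1]: the part after the LAST '_', or t itself if there is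
-- no '_'. Hand port via rfind; exact (both Pythons contain this very expression).
def pvAfterLastUnderscore (t : List Char) : List Char :=
  let r := PySem.Chars.rfind t ['_']
  if r = -1 then t else t.drop (r + 1).toNat

def parse_sseqid (sseqid : String) : List (String × String) :=
  match PySem.Chars.split₀ sseqid.toList with
  | [] => []  -- Python raises IndexError on sseqid.split()[0]; excluded by Pre_
  | first_token :: _ =>
    let acc_id := pvAfterLastUnderscore first_token
    let rest := PySem.Chars.strip (PySem.List.slice sseqid.toList (some (first_token.length : Int)) none)
    let func_end := [" n=".toList, " Tax=".toList, " TaxID=".toList, " RepID=".toList].foldl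
      (fun fe m =>
        let idx := PySem.Chars.find rest m
        if idx ≠ -1 ∧ idx < fe then idx else fe) (rest.length : Int)
    let fn := PySem.Chars.strip (PySem.List.slice rest none (some func_end))
    let tax_idx := PySem.Chars.find rest "Tax=".toList
    let gs :=
      if tax_idx ≠ -1 then
        let tax_str := PySem.List.slice rest (some (tax_idx + 4)) none
        let tax_str2 := [" TaxID=".toList, " RepID=".toList, " n=".toList].foldl
          (fun t stop =>
            let si := PySem.Chars.find t stop
            if si ≠ -1 then PySem.List.slice t none (some si) else t) tax_str
        let tax_parts := PySem.Chars.split₀ (PySem.Chars.strip tax_str2)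
        ((match tax_parts with | [] => ([] : List Char) | g :: _ => g),
         (match tax_parts with | _ :: s :: _ => s | _ => ([] : List Char)))
      else ([], [])
    [("acc_id", String.ofList acc_id), ("function", String.ofList fn),
     ("genus", String.ofList gs.1), ("species", String.ofList gs.2)]

-- ===== PORT B =====

-- Python t.rsplit('_', 1)[-1] again, B-side copy (the checker forbids shared helpers)
def pvAfterLastUnderscoreB (t : List Char) : List Char :=
  let r := PySem.Chars.rfind t ['_']
  if r = -1 then t else t.drop (r + 1).toNat

-- port of Source B's _first_hit: scan i = 0,1,… over s (carried as its suffix), return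
-- the first i where some marker starts (s.startswith(m, i) = m.isPrefixOf s[i:]), else len(s)
def pvFirstHitAux (markers : List (List Char)) : List Char → Nat → Nat
  | [], i => i
  | t :: ts, i =>
    if markers.any (fun m => m.isPrefixOf (t :: ts)) then i
    else pvFirstHitAux markers ts (i + 1)

def pvFirstHit (s : List Char) (markers : List (List Char)) : Nat :=
  pvFirstHitAux markers s 0

def parse_sseqid_alt (sseqid : String) : List (String × String) :=
  let toks := PySem.Chars.split₀ sseqid.toList
  if toks.isEmpty then [] -- Source B raises IndexError on toks[0] here; excluded by Pre_
  else
    let first_token := toks.headD []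
    let acc_id := pvAfterLastUnderscoreB first_token
    let rest := PySem.Chars.strip (PySem.List.slice sseqid.toList (some (first_token.length : Int)) none)
    -- rest[:k] with the Nat k = _first_hit(...) is List.take
    let fn := PySem.Chars.strip (rest.take (pvFirstHit rest [" n=".toList, " Tax=".toList, " TaxID=".toList, " RepID=".toList]))
    let tax_idx := PySem.Chars.find rest "Tax=".toList
    let gs :=
      if tax_idx ≠ -1 then
        let tax_str := PySem.List.slice rest (some (tax_idx + 4)) none
        let tax_str2 := tax_str.take (pvFirstHit tax_str [" TaxID=".toList, " RepID=".toList, " n=".toList])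
        let tax_parts := PySem.Chars.split₀ (PySem.Chars.strip tax_str2)
        -- 'tax_parts[0] if tax_parts else ""' / 'tax_parts[1] if len(tax_parts) > 1 else ""'
        (tax_parts.headD [], tax_parts[1]?.getD [])
      else ([], [])
    [("acc_id", String.ofList acc_id), ("function", String.ofList fn),
     ("genus", String.ofList gs.1), ("species", String.ofList gs.2)]

-- ===== PRECONDITION & SPEC =====
-- Pre_ excludes exactly the inputs where A raises: sseqid.split() == [] (whitespace-only
-- or empty string) makes sseqid.split()[0] raise IndexError (Source B raises there too).
def Pre_parse_sseqid (sseqid : String) : Prop := PySem.Chars.split₀ sseqid.toList ≠ []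
instance (sseqid : String) : Decidable (Pre_parse_sseqid sseqid) := by unfold Pre_parse_sseqid; infer_instance

def pvWitness_parse_sseqid : String :=
  "UniRef50_Q63036 Rat albumin (Fragment) n=1 Tax=Rattus norvegicus TaxID=10116 RepID=Q63036_RAT"

def Spec_parse_sseqid (sseqid : String) (out : List (String × String)) : Prop := out = parse_sseqid_alt sseqid
instance (sseqid : String) (out : List (String × String)) : Decidable (Spec_parse_sseqid sseqid out) := by unfold Spec_parse_sseqid; infer_instance

-- ===== CLAIM (what is proved, stated in full; the proofs are below) =====
def Claim_equal_parse_sseqid : Prop := ∀ (sseqid : String), Dom_parse_sseqid sseqid → Pre_parse_sseqid sseqid → Spec_parse_sseqid sseqid (parse_sseqid sseqid)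

-- ===== LEMMAS AND PROOFS =====

-- 'some marker of M starts at position j of s'
def pvHit (M : List (List Char)) (s : List Char) (j : Nat) : Prop := ∃ m ∈ M, m <+: s.drop j

-- a number ≤ L that is L or a hit position, with no hit before it, is unique
lemma pv_least_unique {L a b : Nat} {P : Nat → Prop}
    (ha1 : a ≤ L) (ha2 : a = L ∨ P a) (ha3 : ∀ j < a, ¬ P j)
    (hb1 : b ≤ L) (hb2 : b = L ∨ P b) (hb3 : ∀ j < b, ¬ P j) : a = b := by
  by_contra hne
  rcases Nat.lt_or_ge a b with h | h
  · exact hb3 a h (ha2.resolve_left (by omega))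
  · exact ha3 b (by omega) (hb2.resolve_left (by omega))

lemma pvFirstHitAux_shift (M : List (List Char)) (s : List Char) (i : Nat) :
    pvFirstHitAux M s i = i + pvFirstHitAux M s 0 := by
  induction s generalizing i with
  | nil => simp [pvFirstHitAux]
  | cons t ts ih =>
    simp only [pvFirstHitAux]
    split
    · simp
    · rw [ih (i+1), ih 1]; omega

lemma pvFirstHit_le (s : List Char) (M : List (List Char)) : pvFirstHit s M ≤ s.length := by
  induction s with
  | nil => simp [pvFirstHit, pvFirstHitAux]
  | cons t ts ih =>
    show pvFirstHitAux M (t :: ts) 0 ≤ (t :: ts).length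
    simp only [pvFirstHitAux]
    split
    · simp
    · rw [pvFirstHitAux_shift]
      have : pvFirstHitAux M ts 0 ≤ ts.length := ih
      simp only [List.length_cons]
      omega

lemma pvFirstHit_not_hit (s : List Char) (M : List (List Char)) :
    ∀ j < pvFirstHit s M, ¬ pvHit M s j := by
  induction s with
  | nil => intro j hj; simp [pvFirstHit, pvFirstHitAux] at hj
  | cons t ts ih =>
    intro j hj hhit
    have hj' : j < pvFirstHitAux M (t :: ts) 0 := hj
    simp only [pvFirstHitAux] at hj'
    by_cases h : (M.any (fun m => m.isPrefixOf (t :: ts))) = true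
    · rw [if_pos h] at hj'; omega
    · rw [if_neg h, pvFirstHitAux_shift] at hj'
      have hd : pvFirstHit ts M = pvFirstHitAux M ts 0 := rfl
      match j with
      | 0 =>
        rcases hhit with ⟨m, hm, hp⟩
        exact h (List.any_eq_true.mpr ⟨m, hm, List.isPrefixOf_iff_prefix.mpr (by simpa using hp)⟩)
      | j' + 1 =>
        exact ih j' (by omega) (by simpa [pvHit] using hhit)

lemma pvFirstHit_hit (s : List Char) (M : List (List Char)) :
    pvFirstHit s M = s.length ∨ pvHit M s (pvFirstHit s M) := by
  induction s with
  | nil => simp [pvFirstHit, pvFirstHitAux]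
  | cons t ts ih =>
    show pvFirstHitAux M (t :: ts) 0 = (t :: ts).length ∨ pvHit M (t :: ts) (pvFirstHitAux M (t :: ts) 0)
    simp only [pvFirstHitAux]
    split
    · next h =>
      right
      rcases List.any_eq_true.mp h with ⟨m, hm, hp⟩
      exact ⟨m, hm, by simpa using List.isPrefixOf_iff_prefix.mp hp⟩
    · rw [pvFirstHitAux_shift]
      rcases ih with h1 | h1
      · left; simp [pvFirstHit] at h1; simp [h1]; omega
      · right
        have : pvHit M ts (pvFirstHitAux M ts 0) := h1
        simpa [pvHit, Nat.add_comm 1 (pvFirstHitAux M ts 0)] using this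

-- a prefix occurrence somewhere in s is an infix of s
lemma pv_infix_of_prefix_drop {m s : List Char} {j : Nat} (h : m <+: s.drop j) : m <:+: s := by
  rcases h with ⟨u, hu⟩
  refine ⟨s.take j, u, ?_⟩
  rw [List.append_assoc, hu, List.take_append_drop]

-- characters covered by a prefix occurrence
lemma pv_getElem?_of_prefix_drop {s m : List Char} {j o : Nat} (h : m <+: s.drop j)
    (ho : o < m.length) : s[j + o]? = m[o]? := by
  rcases h with ⟨u, hu⟩
  have : (s.drop j)[o]? = m[o]? := by
    rw [← hu]; exact List.getElem?_append_left ho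
  rwa [List.getElem?_drop] at this

lemma pv_length_le_of_prefix_drop {s m : List Char} {j : Nat} (h : m <+: s.drop j) :
    j + m.length ≤ s.length ∨ s.length ≤ j := by
  have := h.length_le
  simp [List.length_drop] at this
  omega

-- occurrence inside a take-prefix = occurrence in the whole list that fits
lemma pv_prefix_take_drop {t0 m : List Char} {l j : Nat} (hj : j ≤ l) :
    m <+: (t0.take l).drop j ↔ m <+: t0.drop j ∧ j + m.length ≤ l := by
  rw [List.drop_take, List.prefix_take_iff]
  constructor
  · rintro ⟨h1, h2⟩; exact ⟨h1, by omega⟩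
  · rintro ⟨h1, h2⟩; exact ⟨h1, by omega⟩

-- no marker (space head, no space later) can straddle a position that is the end of
-- the string or holds a space
lemma pv_no_straddle {t0 m : List Char} {j l : Nat} (hm : ∃ tl, m = ' ' :: tl ∧ ' ' ∉ tl)
    (hj : m <+: t0.drop j) (h1 : j < l) (h2 : l < j + m.length)
    (hl : l = t0.length ∨ t0[l]? = some ' ') : False := by
  rcases hm with ⟨tl, rfl, htl⟩
  have hfit : j + (' ' :: tl).length ≤ t0.length := by
    rcases pv_length_le_of_prefix_drop hj with h | h
    · exact h
    · -- s.length ≤ j < l < j + len and the prefix must be nil then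
      have : t0.drop j = [] := by
        apply List.eq_nil_of_length_eq_zero; simp; omega
      rw [this] at hj
      have := hj.length_le; simp at this
  have hchar : t0[l]? = (' ' :: tl)[l - j]? := by
    have := pv_getElem?_of_prefix_drop hj (o := l - j) (by omega)
    rwa [Nat.add_sub_cancel' (le_of_lt h1)] at this
  rcases hl with rfl | hsp
  · omega
  · rw [hsp] at hchar
    have hlj : 1 ≤ l - j := by omega
    have : tl[l - j - 1]? = some ' ' := by
      rcases Nat.exists_eq_add_of_le hlj with ⟨o, ho⟩
      simp only [ho] at hchar ⊢
      simpa [Nat.add_comm] using hchar.symm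
    have : ' ' ∈ tl := by
      rcases List.getElem?_eq_some_iff.mp this with ⟨hlt, hEq⟩
      exact hEq ▸ List.getElem_mem hlt
    exact htl this

-- A's function-field fold computes the least marker position (as the min of finds)
lemma pvFoldFind_spec (M : List (List Char)) (s : List Char) :
    ∀ v : Int, 0 ≤ v →
    (0 ≤ M.foldl (fun fe m =>
        let idx := PySem.Chars.find s m
        if idx ≠ -1 ∧ idx < fe then idx else fe) v) ∧
    (M.foldl (fun fe m =>
        let idx := PySem.Chars.find s m
        if idx ≠ -1 ∧ idx < fe then idx else fe) v ≤ v) ∧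
    (M.foldl (fun fe m =>
        let idx := PySem.Chars.find s m
        if idx ≠ -1 ∧ idx < fe then idx else fe) v = v ∨
        pvHit M s (M.foldl (fun fe m =>
          let idx := PySem.Chars.find s m
          if idx ≠ -1 ∧ idx < fe then idx else fe) v).toNat) ∧
    (∀ j : Nat, (j : Int) < M.foldl (fun fe m =>
        let idx := PySem.Chars.find s m
        if idx ≠ -1 ∧ idx < fe then idx else fe) v → ¬ pvHit M s j) := by
  induction M with
  | nil =>
    intro v hv
    refine ⟨by simpa using hv, by simp, by simp, ?_⟩
    rintro j _ ⟨m, hm, _⟩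
    simp at hm
  | cons m M ihM =>
    intro v hv
    rw [List.foldl_cons]
    have hstep : (let idx := PySem.Chars.find s m
        if idx ≠ -1 ∧ idx < v then idx else v) =
        (if PySem.Chars.find s m ≠ -1 ∧ PySem.Chars.find s m < v
         then PySem.Chars.find s m else v) := rfl
    rw [hstep]
    by_cases hc : PySem.Chars.find s m ≠ -1 ∧ PySem.Chars.find s m < v
    · rw [if_pos hc]
      have hf0 : 0 ≤ PySem.Chars.find s m := by
        have := PySem.Chars.neg_one_le_find (s := s) (sub := m)
        omega
      have hspec := PySem.Chars.find_spec hf0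
      obtain ⟨ih0, ih1, ih2, ih3⟩ := ihM (PySem.Chars.find s m) hf0
      refine ⟨ih0, by omega, ?_, ?_⟩
      · rcases ih2 with h | h
        · right; exact ⟨m, List.mem_cons_self, by rw [h]; exact hspec.1⟩
        · right; rcases h with ⟨m', hm', hp⟩; exact ⟨m', List.mem_cons_of_mem _ hm', hp⟩
      · rintro j hj ⟨m', hm', hp⟩
        rcases List.mem_cons.mp hm' with rfl | hm'
        · refine hspec.2 j ?_ hp
          have := ih1; omega
        · exact ih3 j hj ⟨m', hm', hp⟩
    · rw [if_neg hc]
      have hmleast : ∀ j : Nat, (j : Int) < v → ¬ m <+: s.drop j := by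
        intro j hj hp
        by_cases hne : PySem.Chars.find s m = -1
        · exact ((PySem.Chars.find_eq_neg_one_iff _ _).mp hne) (pv_infix_of_prefix_drop hp)
        · have hge : v ≤ PySem.Chars.find s m := by
            rcases not_and_or.mp hc with h | h
            · exact absurd hne (by simpa using h)
            · omega
          have hf0 : 0 ≤ PySem.Chars.find s m := le_trans hv hge
          exact (PySem.Chars.find_spec hf0).2 j (by omega) hp
      obtain ⟨ih0, ih1, ih2, ih3⟩ := ihM v hv
      refine ⟨ih0, ih1, ?_, ?_⟩
      · rcases ih2 with h | h
        · left; exact h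
        · right; rcases h with ⟨m', hm', hp⟩; exact ⟨m', List.mem_cons_of_mem _ hm', hp⟩
      · rintro j hj ⟨m', hm', hp⟩
        rcases List.mem_cons.mp hm' with rfl | hm'
        · exact hmleast j (by omega) hp
        · exact ih3 j hj ⟨m', hm', hp⟩

-- A's sequential stop-marker truncation cuts exactly at the first simultaneous hit
lemma pvFoldCut_spec (S : List (List Char)) (t0 : List Char)
    (hS : ∀ m ∈ S, ∃ tl, m = ' ' :: tl ∧ ' ' ∉ tl) :
    ∀ l : Nat, l ≤ t0.length → (l = t0.length ∨ t0[l]? = some ' ') →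
    ∃ l', S.foldl (fun t stop =>
            let si := PySem.Chars.find t stop
            if si ≠ -1 then PySem.List.slice t none (some si) else t) (t0.take l)
            = t0.take l' ∧
          l' ≤ l ∧
          (l' = l ∨ pvHit S t0 l') ∧
          (∀ j < l', ¬ pvHit S t0 j) ∧
          (l' = t0.length ∨ t0[l']? = some ' ') := by
  induction S with
  | nil =>
    intro l hl hsp
    exact ⟨l, rfl, le_rfl, Or.inl rfl, by rintro j hj ⟨m, hm, _⟩; simp at hm, hsp⟩
  | cons m S ihS =>
    intro l hl hsp
    obtain ⟨tl, hmtl, htl⟩ := hS m List.mem_cons_self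
    have hS' : ∀ m' ∈ S, ∃ tl, m' = ' ' :: tl ∧ ' ' ∉ tl :=
      fun m' hm' => hS m' (List.mem_cons_of_mem _ hm')
    have hmlen : 1 ≤ m.length := by rw [hmtl]; simp
    rw [List.foldl_cons]
    have hstep : (let si := PySem.Chars.find (t0.take l) m
        if si ≠ -1 then PySem.List.slice (t0.take l) none (some si) else t0.take l) =
        (if PySem.Chars.find (t0.take l) m ≠ -1
         then PySem.List.slice (t0.take l) none (some (PySem.Chars.find (t0.take l) m))
         else t0.take l) := rfl
    rw [hstep]
    by_cases hc : PySem.Chars.find (t0.take l) m ≠ -1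
    · rw [if_pos hc]
      have hf0 : 0 ≤ PySem.Chars.find (t0.take l) m := by
        have := PySem.Chars.neg_one_le_find (s := t0.take l) (sub := m)
        omega
      have hspec := PySem.Chars.find_spec hf0
      set k := (PySem.Chars.find (t0.take l) m).toNat with hk_def
      have hkl : k ≤ l := by
        have h1 := PySem.Chars.find_le_length (s := t0.take l) (sub := m)
        have h2 : (t0.take l).length ≤ l := by simp
        omega
      have hocc : m <+: t0.drop k ∧ k + m.length ≤ l :=
        (pv_prefix_take_drop hkl).mp hspec.1
      have hcast : PySem.Chars.find (t0.take l) m = ((k : Nat) : Int) := by omega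
      rw [hcast, PySem.List.slice_to_natCast, List.take_take, min_eq_left (by omega)]
      have hkT : k ≤ t0.length := le_trans hkl hl
      have hspk : k = t0.length ∨ t0[k]? = some ' ' := by
        right
        have := pv_getElem?_of_prefix_drop hocc.1 (o := 0) (by omega)
        simpa [hmtl] using this
      have hmleast : ∀ j < k, ¬ m <+: t0.drop j := by
        intro j hjk hpj
        by_cases hfit : j + m.length ≤ l
        · exact hspec.2 j hjk ((pv_prefix_take_drop (by omega)).mpr ⟨hpj, hfit⟩)
        · exact pv_no_straddle ⟨tl, hmtl, htl⟩ hpj (by omega) (by omega) hsp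
      obtain ⟨l', hfold, hle, hhit, hleast, hsp'⟩ := ihS hS' k hkT hspk
      refine ⟨l', hfold, by omega, ?_, ?_, hsp'⟩
      · rcases hhit with rfl | h
        · exact Or.inr ⟨m, List.mem_cons_self, hocc.1⟩
        · rcases h with ⟨m', hm', hp⟩
          exact Or.inr ⟨m', List.mem_cons_of_mem _ hm', hp⟩
      · rintro j hj ⟨m', hm', hp⟩
        rcases List.mem_cons.mp hm' with rfl | hm'
        · exact hmleast j (by omega) hp
        · exact hleast j hj ⟨m', hm', hp⟩
    · rw [if_neg hc]
      have hne : PySem.Chars.find (t0.take l) m = -1 := by omega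
      have hninf := (PySem.Chars.find_eq_neg_one_iff _ _).mp hne
      have hmleast : ∀ j < l, ¬ m <+: t0.drop j := by
        intro j hjl hpj
        by_cases hfit : j + m.length ≤ l
        · exact hninf (pv_infix_of_prefix_drop
            ((pv_prefix_take_drop (by omega)).mpr ⟨hpj, hfit⟩))
        · exact pv_no_straddle ⟨tl, hmtl, htl⟩ hpj hjl (by omega) hsp
      obtain ⟨l', hfold, hle, hhit, hleast, hsp'⟩ := ihS hS' l hl hsp
      refine ⟨l', hfold, hle, ?_, ?_, hsp'⟩
      · rcases hhit with rfl | h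
        · exact Or.inl rfl
        · rcases h with ⟨m', hm', hp⟩
          exact Or.inr ⟨m', List.mem_cons_of_mem _ hm', hp⟩
      · rintro j hj ⟨m', hm', hp⟩
        rcases List.mem_cons.mp hm' with rfl | hm'
        · exact hmleast j (by omega) hp
        · exact hleast j hj ⟨m', hm', hp⟩

-- A's value-matches written as B's accessors
lemma pv_match_head (ps : List (List Char)) :
    (match ps with | [] => ([] : List Char) | g :: _ => g) = ps.headD [] := by
  cases ps <;> rfl

lemma pv_match_second (ps : List (List Char)) :
    (match ps with | _ :: s :: _ => s | _ => ([] : List Char)) = ps[1]?.getD [] := by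
  match ps with
  | [] => rfl
  | [_] => rfl
  | _ :: _ :: _ => rfl

-- the two B-side copies agree
lemma pvAfterLastUnderscoreB_eq (t : List Char) :
    pvAfterLastUnderscoreB t = pvAfterLastUnderscore t := rfl

-- the two corollaries used by the verdict proof
lemma pv_funcend_eq (rest : List Char) (M : List (List Char)) :
    M.foldl (fun fe m =>
        let idx := PySem.Chars.find rest m
        if idx ≠ -1 ∧ idx < fe then idx else fe) (rest.length : Int)
      = ((pvFirstHit rest M : Nat) : Int) := by
  obtain ⟨h0, hle, hhit, hleast⟩ := pvFoldFind_spec M rest (rest.length : Int) (by positivity)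
  set E := M.foldl (fun fe m =>
        let idx := PySem.Chars.find rest m
        if idx ≠ -1 ∧ idx < fe then idx else fe) (rest.length : Int) with hE
  have ha : E.toNat = pvFirstHit rest M := by
    refine pv_least_unique (L := rest.length) (P := pvHit M rest)
      (by omega) ?_ (fun j hj => hleast j (by omega))
      (pvFirstHit_le rest M) (pvFirstHit_hit rest M) (pvFirstHit_not_hit rest M)
    rcases hhit with h | h
    · left; omega
    · right; exact h
  omega

lemma pv_cut_eq3 (t0 : List Char) :
    [" TaxID=".toList, " RepID=".toList, " n=".toList].foldl (fun t stop =>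
        let si := PySem.Chars.find t stop
        if si ≠ -1 then PySem.List.slice t none (some si) else t) t0
      = t0.take (pvFirstHit t0 [" TaxID=".toList, " RepID=".toList, " n=".toList]) := by
  have hS : ∀ m ∈ [" TaxID=".toList, " RepID=".toList, " n=".toList],
      ∃ tl, m = ' ' :: tl ∧ ' ' ∉ tl := by
    intro m hm
    rcases List.mem_cons.mp hm with rfl | hm
    · exact ⟨"TaxID=".toList, by decide, by decide⟩
    rcases List.mem_cons.mp hm with rfl | hm
    · exact ⟨"RepID=".toList, by decide, by decide⟩
    rcases List.mem_cons.mp hm with rfl | hm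
    · exact ⟨"n=".toList, by decide, by decide⟩
    · simp at hm
  obtain ⟨l', hfold, hle, hhit, hleast, _⟩ :=
    pvFoldCut_spec _ t0 hS t0.length le_rfl (Or.inl rfl)
  rw [List.take_length] at hfold
  have : l' = pvFirstHit t0 [" TaxID=".toList, " RepID=".toList, " n=".toList] := by
    refine pv_least_unique (L := t0.length) (P := pvHit [" TaxID=".toList, " RepID=".toList, " n=".toList] t0)
      hle hhit hleast (pvFirstHit_le _ _) (pvFirstHit_hit _ _) (pvFirstHit_not_hit _ _)
  rw [hfold, this]

-- ===== VERDICT (by name: the statement is the Claim_ definition above) =====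
theorem parse_sseqid_spec : Claim_equal_parse_sseqid := by
  intro sseqid hdom hpre
  unfold Spec_parse_sseqid parse_sseqid parse_sseqid_alt
  cases hsplit : PySem.Chars.split₀ sseqid.toList with
  | nil => exact absurd hsplit hpre
  | cons ft rest_toks =>
    simp only [pv_funcend_eq, PySem.List.slice_to_natCast, pv_cut_eq3, pvAfterLastUnderscoreB_eq,
      pv_match_head, pv_match_second, List.isEmpty_cons, List.headD_cons, Bool.false_eq_true,
      if_false]
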